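-- pv_equiv track=rewrite | github.com/PR3x/Advent-of-Code | 2015/day5.py | part2
-- ===== SOURCE A (Python) =====
-- def part2(line) -> bool:
--     repeat_pair = False
--     repeat_after_one = False
--
--     line_len = len(line)
--     for i in range(line_len):
--         if i != 0 and not repeat_pair:
--             pair = f"{line[i-1]}{line[i]}"
--             if pair in line[i+1:]:
--                 repeat_pair = True
--         try:
--             if line[i] == line[i+2]:
--                 repeat_after_one = True
--         except IndexError:
--             pass
--
--     return repeat_pair and repeat_after_one
-- ===== SOURCE B (Python) =====
-- def part2(line) -> bool:
--     n = len(line)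
--     first = {}
--     pair_ok = False
--     for i in range(n - 1):
--         p = line[i:i + 2]
--         j = first.get(p)
--         if j is None:
--             first[p] = i
--         elif i - j >= 2:
--             pair_ok = True
--     sandwich = any(line[i] == line[i + 2] for i in range(n - 2))
--     return pair_ok and sandwich
-- ===== Notes on version B (the rewrite author's own statement) =====
-- stated objective: alternative
-- what changed: Replaces A's flag loop, which searches each two-char pair as a substring of the rest of the string and uses try/except for the sandwich test, by a single pass recording each pair's first index in a dict (a later occurrence at distance at least 2 proves the non-overlapping repeat) plus an any() over indices for the sandwich; asymptotically O(n) vs A's O(n^2) worst case, but CPython's C-level substring search keeps A at least as fast on measured inputs.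
import Mathlib
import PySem

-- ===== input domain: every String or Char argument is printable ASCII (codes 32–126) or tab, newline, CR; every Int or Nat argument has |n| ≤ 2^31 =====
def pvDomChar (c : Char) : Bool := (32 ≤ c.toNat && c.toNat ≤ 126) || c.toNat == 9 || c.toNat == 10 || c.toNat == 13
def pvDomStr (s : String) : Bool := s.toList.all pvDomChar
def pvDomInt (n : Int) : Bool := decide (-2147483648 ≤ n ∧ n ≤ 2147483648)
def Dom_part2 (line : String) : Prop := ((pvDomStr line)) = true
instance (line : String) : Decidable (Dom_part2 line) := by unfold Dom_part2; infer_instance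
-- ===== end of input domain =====

-- B replaces A's per-index substring search and try/except sandwich test by a single dict pass
-- (pair -> first index) plus an any() over indices; alternative algorithm, not claimed faster.

-- ===== PORT A =====
def part2 (line : String) : Bool :=
  let l := line.toList
  let r := (PySem.List.pyRange 0 l.length 1).foldl (fun (st : Bool × Bool) i =>
      let rp := if decide (i ≠ 0) && !st.1 then
          (if PySem.Chars.isIn [PySem.List.pyGetD l (i-1) ' ', PySem.List.pyGetD l i ' ']
              (PySem.List.slice l (some (i+1)) none) then true else st.1)
        else st.1
      let ra := match PySem.List.pyGet? l (i+2) with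
        | some c => if PySem.List.pyGetD l i ' ' == c then true else st.2
        | none => st.2
      (rp, ra)) (false, false)
  r.1 && r.2

-- ===== PORT B =====
def part2_alt (line : String) : Bool :=
  let l := line.toList
  let n : Int := l.length
  let st := (PySem.List.pyRange 0 (n - 1) 1).foldl
      (fun (st : PySem.Dict (List Char) Int × Bool) i =>
        let p := PySem.List.slice l (some i) (some (i + 2))
        match st.1.get? p with
        | none => (st.1.insert p i, st.2)
        | some j => (st.1, if i - j ≥ 2 then true else st.2))
      (PySem.Dict.empty, false)
  let sandwich := (PySem.List.pyRange 0 (n - 2) 1).any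
      (fun i => PySem.List.pyGetD l i ' ' == PySem.List.pyGetD l (i + 2) ' ')
  st.2 && sandwich

-- ===== PRECONDITION & SPEC =====
def Spec_part2 (line : String) (out : Bool) : Prop := out = part2_alt line
instance (line : String) (out : Bool) : Decidable (Spec_part2 line out) := by unfold Spec_part2; infer_instance

-- ===== CLAIM (what is proved, stated in full; the proofs are below) =====
def Claim_equal_part2 : Prop := ∀ (line : String), Dom_part2 line → Spec_part2 line (part2 line)

-- ===== LEMMAS AND PROOFS =====

-- the two-character pair starting at index k (getD form; only used under bounds)
def pairAt (l : List Char) (k : Nat) : List Char := [l.getD k ' ', l.getD (k+1) ' ']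

-- Bool: some index i < m (i ≥ 1) whose pair (i-1,i) recurs in l[i+1:]  (shape of A's repeat_pair flag)
def rpaB (l : List Char) (m : Nat) : Bool :=
  (List.range m).any fun i => decide (1 ≤ i) && decide ([l.getD (i-1) ' ', l.getD i ' '] <:+: l.drop (i+1))

-- Bool: some b < m whose pair already occurred at some a ≤ b-2  (shape of B's pair_ok flag)
def rpB (l : List Char) (m : Nat) : Bool :=
  (List.range m).any fun b => decide (b+1 < l.length) &&
    ((List.range b).any fun a => decide (a+2 ≤ b) && decide (pairAt l a = pairAt l b))

-- Bool: sandwich letter below m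
def spB (l : List Char) (m : Nat) : Bool :=
  (List.range m).any fun i => decide (i+2 < l.length) && decide (l.getD i ' ' = l.getD (i+2) ' ')

theorem pair_infix_iff (x y : Char) (s : List Char) :
    [x, y] <:+: s ↔ ∃ j, j + 1 < s.length ∧ s.getD j ' ' = x ∧ s.getD (j+1) ' ' = y := by
  constructor
  · rintro ⟨t, u, rfl⟩
    rw [List.append_assoc]
    refine ⟨t.length, by simp, ?_, ?_⟩
    · rw [List.getD_eq_getElem _ _ (by simp), List.getElem_append_right (by omega)]
      simp
    · rw [List.getD_eq_getElem _ _ (by simp), List.getElem_append_right (by omega)]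
      simp
  · rintro ⟨j, hj, hx, hy⟩
    refine ⟨s.take j, s.drop (j+2), ?_⟩
    rw [List.getD_eq_getElem _ _ (by omega)] at hx
    rw [List.getD_eq_getElem _ _ (by omega)] at hy
    have h1 : s.drop j = s[j] :: s.drop (j+1) := List.drop_eq_getElem_cons (by omega)
    have h2 : s.drop (j+1) = s[j+1] :: s.drop (j+2) := List.drop_eq_getElem_cons (by omega)
    calc s.take j ++ [x, y] ++ s.drop (j+2) = s.take j ++ (s[j] :: s[j+1] :: s.drop (j+2)) := by
          rw [hx, hy]; simp
      _ = s.take j ++ s.drop j := by rw [h1, h2]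
      _ = s := List.take_append_drop j s

theorem getD_drop' (l : List Char) (k j : Nat) (h : k + j < l.length) :
    (l.drop k).getD j ' ' = l.getD (k+j) ' ' := by
  rw [List.getD_eq_getElem _ _ (by simp; omega), List.getD_eq_getElem _ _ (by omega)]
  simp

-- A's flag and B's flag test the same thing: a pair repeated without overlap
theorem rpaB_eq_rpB (l : List Char) : rpaB l l.length = rpB l (l.length - 1) := by
  rw [Bool.eq_iff_iff]
  simp only [rpaB, rpB, List.any_eq_true, List.mem_range, Bool.and_eq_true, decide_eq_true_eq]
  constructor
  · rintro ⟨i, hi, h1, hinf⟩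
    rw [pair_infix_iff] at hinf
    obtain ⟨j, hj, hx, hy⟩ := hinf
    simp only [List.length_drop] at hj
    rw [getD_drop' _ _ _ (by omega)] at hx
    rw [getD_drop' _ _ _ (by omega)] at hy
    refine ⟨i+1+j, by omega, by omega, i-1, by omega, by omega, ?_⟩
    simp only [pairAt]
    rw [show i - 1 + 1 = i by omega, show i + 1 + j + 1 = i + 1 + (j+1) by omega, ← hx, ← hy]
  · rintro ⟨b, hb, hb1, a, hab, ha2, hpq⟩
    simp only [pairAt, List.cons.injEq, and_true] at hpq
    obtain ⟨hx, hy⟩ := hpq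
    refine ⟨a+1, by omega, by omega, ?_⟩
    rw [pair_infix_iff]
    refine ⟨b - (a+2), ?_, ?_, ?_⟩
    · simp only [List.length_drop]; omega
    · rw [getD_drop' _ _ _ (by omega), show a + 1 + 1 + (b - (a+2)) = b by omega,
        show a + 1 - 1 = a by omega]
      exact hx.symm
    · rw [getD_drop' _ _ _ (by omega), show a + 1 + 1 + (b - (a+2) + 1) = b + 1 by omega]
      exact hy.symm

theorem isIn_eq_decide (sub s : List Char) : PySem.Chars.isIn sub s = decide (sub <:+: s) := by
  by_cases h : sub <:+: s
  · simp [h, (PySem.Chars.isIn_iff_infix sub s).mpr h]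
  · simp [h, (PySem.Chars.isIn_eq_false_iff sub s).mpr h]

-- A's loop over indices < m leaves exactly the two flags rpaB / spB
theorem partA_fold (l : List Char) (m : Nat) (hm : m ≤ l.length) :
    (PySem.List.pyRange 0 (m : Int) 1).foldl (fun (st : Bool × Bool) i =>
      let rp := if decide (i ≠ 0) && !st.1 then
          (if PySem.Chars.isIn [PySem.List.pyGetD l (i-1) ' ', PySem.List.pyGetD l i ' ']
              (PySem.List.slice l (some (i+1)) none) then true else st.1)
        else st.1
      let ra := match PySem.List.pyGet? l (i+2) with
        | some c => if PySem.List.pyGetD l i ' ' == c then true else st.2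
        | none => st.2
      (rp, ra)) (false, false)
    = (rpaB l m, spB l m) := by
  induction m with
  | zero => simp [PySem.List.pyRange_one_eq_nil, rpaB, spB]
  | succ m ih =>
    have hm' : m ≤ l.length := by omega
    have hcast : ((m+1 : Nat) : Int) = (m : Int) + 1 := by push_cast; ring
    rw [hcast, PySem.List.pyRange_one_succ_right (by positivity), List.foldl_append,
      ih hm', List.foldl_cons, List.foldl_nil]
    have hslice : PySem.List.slice l (some ((m : Int) + 1)) none = l.drop (m+1) := by
      rw [show ((m:Int)+1) = ((m+1 : Nat) : Int) by push_cast; ring,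
        PySem.List.slice_from_natCast]
    have hget2 : PySem.List.pyGet? l ((m : Int) + 2) = l[m+2]? := by
      rw [show ((m:Int)+2) = ((m+2 : Nat) : Int) by push_cast; ring,
        PySem.List.pyGet?_natCast]
    have hgetm : PySem.List.pyGetD l (m : Int) ' ' = l.getD m ' ' := by simp
    have hsplit : rpaB l (m+1) = (rpaB l m || (decide (1 ≤ m) &&
        decide ([l.getD (m-1) ' ', l.getD m ' '] <:+: l.drop (m+1)))) := by
      conv_lhs => rw [rpaB, List.range_succ]
      rw [List.any_append, List.any_cons, List.any_nil, Bool.or_false, ← rpaB]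
    have hsplit2 : spB l (m+1) = (spB l m || (decide (m+2 < l.length) &&
        decide (l.getD m ' ' = l.getD (m+2) ' '))) := by
      conv_lhs => rw [spB, List.range_succ]
      rw [List.any_append, List.any_cons, List.any_nil, Bool.or_false, ← spB]
    have hrp : (if decide ((m:Int) ≠ 0) && !(rpaB l m) then
          (if PySem.Chars.isIn [PySem.List.pyGetD l ((m:Int)-1) ' ', PySem.List.pyGetD l (m:Int) ' ']
              (PySem.List.slice l (some ((m:Int)+1)) none) then true else rpaB l m)
        else rpaB l m) = rpaB l (m+1) := by
      rw [hsplit]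
      by_cases hm0 : m = 0
      · subst hm0; simp
      · have h1 : 1 ≤ m := by omega
        have hne : decide ((m:Int) ≠ 0) = true := by simp; omega
        rw [hne, Bool.true_and]
        cases hr : rpaB l m with
        | true => simp
        | false =>
          have hg1 : PySem.List.pyGetD l ((m:Int)-1) ' ' = l.getD (m-1) ' ' := by
            rw [show ((m:Int)-1) = ((m-1 : Nat) : Int) by push_cast [h1]; ring]
            simp
          simp only [Bool.not_false, if_true, hg1, hgetm, hslice,
            isIn_eq_decide, Bool.false_or]
          simp [h1]
    have hra : (match PySem.List.pyGet? l ((m:Int)+2) with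
        | some c => if PySem.List.pyGetD l (m:Int) ' ' == c then true else spB l m
        | none => spB l m) = spB l (m+1) := by
      rw [hsplit2, hget2]
      by_cases h2 : m + 2 < l.length
      · rw [List.getElem?_eq_getElem h2]
        have hD : l.getD (m+2) ' ' = l[m+2] := List.getD_eq_getElem _ _ h2
        simp only [hgetm, hD, h2, decide_true, Bool.true_and]
        cases hc : (l.getD m ' ' == l[m+2]) with
        | true => simp_all
        | false => simp_all
      · rw [List.getElem?_eq_none (by omega)]
        simp [h2]
    simp only [← hrp, ← hra]

theorem exists_min_occ (l p : List Char) (m : Nat) (h : ∃ a, a < m ∧ pairAt l a = p) :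
    ∃ jn, jn < m ∧ pairAt l jn = p ∧ ∀ k < jn, pairAt l k ≠ p := by
  obtain ⟨a, ham, hap⟩ := h
  have hex : ∃ a, pairAt l a = p := ⟨a, hap⟩
  refine ⟨Nat.find hex, ?_, Nat.find_spec hex, fun k hk => Nat.find_min hex hk⟩
  exact lt_of_le_of_lt (Nat.find_min' hex hap) ham

theorem slice_pair (l : List Char) (m : Nat) (h : m + 1 < l.length) :
    PySem.List.slice l (some (m : Int)) (some ((m : Int) + 2)) = pairAt l m := by
  have h1 : l.drop m = l[m] :: l.drop (m+1) := List.drop_eq_getElem_cons (by omega)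
  have h2 : l.drop (m+1) = l[m+1] :: l.drop (m+2) := List.drop_eq_getElem_cons (by omega)
  rw [show ((m:Int)+2) = ((m+2 : Nat) : Int) by push_cast; ring, PySem.List.slice_natCast,
    show m + 2 - m = 2 by omega, h1, h2, List.take_succ_cons, List.take_succ_cons,
    List.take_zero, pairAt, List.getD_eq_getElem _ _ (by omega : m < l.length),
    List.getD_eq_getElem _ _ (by omega : m + 1 < l.length)]

-- B's dict pass: the dict holds each pair's first index, the flag is rpB
theorem partB_fold (l : List Char) (m : Nat) (hm : m + 1 ≤ l.length) :
    ∃ D : PySem.Dict (List Char) Int,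
      ((PySem.List.pyRange 0 (m : Int) 1).foldl
        (fun (st : PySem.Dict (List Char) Int × Bool) i =>
          let p := PySem.List.slice l (some i) (some (i + 2))
          match st.1.get? p with
          | none => (st.1.insert p i, st.2)
          | some j => (st.1, if i - j ≥ 2 then true else st.2))
        (PySem.Dict.empty, false))
      = (D, rpB l m) ∧
      (∀ p j, D.get? p = some j ↔
        ∃ jn : Nat, j = (jn : Int) ∧ jn < m ∧ pairAt l jn = p ∧ ∀ k < jn, pairAt l k ≠ p) := by
  induction m with
  | zero =>
    refine ⟨PySem.Dict.empty, by simp [PySem.List.pyRange_one_eq_nil, rpB], ?_⟩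
    intro p j
    simp [PySem.Dict.get?_empty]
  | succ m ih =>
    obtain ⟨D, hD, hinv⟩ := ih (by omega)
    have hm1 : m + 1 < l.length := by omega
    have hcast : ((m+1 : Nat) : Int) = (m : Int) + 1 := by push_cast; ring
    rw [hcast, PySem.List.pyRange_one_succ_right (by positivity), List.foldl_append, hD,
      List.foldl_cons, List.foldl_nil]
    have hsl := slice_pair l m hm1
    have hrp : rpB l (m+1) = (rpB l m ||
        (decide (m+1 < l.length) && ((List.range m).any fun a =>
          decide (a+2 ≤ m) && decide (pairAt l a = pairAt l m)))) := by
      rw [rpB, List.range_succ, List.any_append, List.any_cons, List.any_nil, ← rpB,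
        Bool.or_false]
    cases hget : D.get? (pairAt l m) with
    | none =>
      have hno : ∀ a, a < m → pairAt l a ≠ pairAt l m := by
        intro a ham hap
        obtain ⟨jn, hjm, hjp, hjmin⟩ := exists_min_occ l (pairAt l m) m ⟨a, ham, hap⟩
        have hsome := (hinv (pairAt l m) (jn : Int)).mpr ⟨jn, rfl, hjm, hjp, hjmin⟩
        rw [hget] at hsome
        simp at hsome
      have hany : ((List.range m).any fun a =>
          decide (a+2 ≤ m) && decide (pairAt l a = pairAt l m)) = false := by
        rw [List.any_eq_false]
        intro a ha
        simp only [List.mem_range] at ha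
        simp [hno a ha]
      refine ⟨D.insert (pairAt l m) (m : Int), ?_, ?_⟩
      · simp only [hsl, hget]
        rw [hrp, hany]
        simp
      · intro q j
        by_cases hq : q = pairAt l m
        · subst hq
          rw [PySem.Dict.get?_insert_self D]
          constructor
          · rintro h
            refine ⟨m, by simpa using h.symm, by omega, rfl, hno⟩
          · rintro ⟨jn, rfl, hjm, hjp, hjmin⟩
            have hjn : jn = m := by
              by_contra hne
              exact hno jn (by omega) hjp
            simp [hjn]
        · rw [PySem.Dict.get?_insert_of_ne D _ hq, hinv]
          constructor
          · rintro ⟨jn, rfl, hjm, hjp, hjmin⟩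
            exact ⟨jn, rfl, by omega, hjp, hjmin⟩
          · rintro ⟨jn, rfl, hjm, hjp, hjmin⟩
            rcases Nat.lt_succ_iff_lt_or_eq.mp hjm with hlt | heq
            · exact ⟨jn, rfl, hlt, hjp, hjmin⟩
            · exact absurd (by rw [← hjp, heq] : q = pairAt l m) hq
    | some j =>
      obtain ⟨jn, rfl, hjm, hjp, hjmin⟩ := (hinv _ _).mp hget
      refine ⟨D, ?_, ?_⟩
      · simp only [hsl, hget]
        rw [hrp]
        by_cases h2 : jn + 2 ≤ m
        · rw [if_pos (by omega : (m : Int) - (jn : Int) ≥ 2)]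
          have hany : ((List.range m).any fun a =>
              decide (a+2 ≤ m) && decide (pairAt l a = pairAt l m)) = true := by
            rw [List.any_eq_true]
            exact ⟨jn, List.mem_range.mpr hjm, by simp [h2, hjp]⟩
          rw [hany]
          simp [hm1]
        · rw [if_neg (by omega : ¬((m : Int) - (jn : Int) ≥ 2))]
          have hany : ((List.range m).any fun a =>
              decide (a+2 ≤ m) && decide (pairAt l a = pairAt l m)) = false := by
            rw [List.any_eq_false]
            intro a ha
            simp only [List.mem_range] at ha
            by_cases hap : pairAt l a = pairAt l m
            · have hle : jn ≤ a := by
                by_contra hlt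
                exact hjmin a (by omega) hap
              simp [show ¬(a + 2 ≤ m) by omega]
            · simp [hap]
          rw [hany]
          simp
      · intro q j'
        rw [hinv]
        constructor
        · rintro ⟨kn, rfl, hkm, hkp, hkmin⟩
          exact ⟨kn, rfl, by omega, hkp, hkmin⟩
        · rintro ⟨kn, rfl, hkm, hkp, hkmin⟩
          rcases Nat.lt_succ_iff_lt_or_eq.mp hkm with hlt | heq
          · exact ⟨kn, rfl, hlt, hkp, hkmin⟩
          · exact absurd (hjp.trans (by rw [← heq]; exact hkp))
              (hkmin jn (by omega))

-- B's any() over range(n-2) is the sandwich flag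
theorem sandwich_eq (l : List Char) :
    ((PySem.List.pyRange 0 ((l.length : Int) - 2) 1).any
      (fun i => PySem.List.pyGetD l i ' ' == PySem.List.pyGetD l (i + 2) ' '))
    = spB l l.length := by
  rw [Bool.eq_iff_iff]
  simp only [spB, List.any_eq_true, List.mem_range, Bool.and_eq_true, decide_eq_true_eq,
    PySem.List.mem_pyRange_one]
  constructor
  · rintro ⟨i, ⟨h0, hi⟩, hbeq⟩
    lift i to Nat using h0
    refine ⟨i, by omega, by omega, ?_⟩
    rw [show ((i : Nat) : Int) + 2 = ((i + 2 : Nat) : Int) by push_cast; ring,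
      PySem.List.pyGetD_natCast, PySem.List.pyGetD_natCast, beq_iff_eq] at hbeq
    exact hbeq
  · rintro ⟨i, hi, h2, heq⟩
    refine ⟨(i : Int), ⟨by omega, by omega⟩, ?_⟩
    rw [show ((i : Nat) : Int) + 2 = ((i + 2 : Nat) : Int) by push_cast; ring,
      PySem.List.pyGetD_natCast, PySem.List.pyGetD_natCast, beq_iff_eq]
    exact heq

-- ===== VERDICT (by name: the statement is the Claim_ definition above) =====
theorem part2_spec : Claim_equal_part2 := by
  intro line _
  simp only [Spec_part2, part2, part2_alt]
  rw [partA_fold line.toList line.toList.length le_rfl]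
  rw [sandwich_eq]
  by_cases hlen : line.toList.length = 0
  · rw [show ((line.toList.length : Int) - 1) = -1 by omega]
    rw [PySem.List.pyRange_one_eq_nil (by omega)]
    simp [rpaB, spB, hlen]
  · rw [show ((line.toList.length : Int) - 1) = ((line.toList.length - 1 : Nat) : Int) by omega]
    obtain ⟨D, hD, -⟩ := partB_fold line.toList (line.toList.length - 1) (by omega)
    rw [hD]
    have hr := rpaB_eq_rpB line.toList
    simp only [String.length_toList] at hr
    simp [hr]
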